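-- pv_equiv track=rewrite | github.com/lukefr-coder/Auto-Invoice_V2 | app/ui/calibration_window.py | _ensure_schema_defaults
-- ===== SOURCE A (Python) =====
-- from typing import Any
--
-- def _default_roi() -> dict[str, Any]:
-- 	return {"x": None, "y": None, "w": None, "h": None, "dpi": 150}
--
-- def _default_profile() -> dict[str, Any]:
-- 	# Schema must match exactly.
-- 	return {
-- 		"primary_file_type": {"file_type_roi": _default_roi()},
-- 		"tax_invoice": {
-- 			"doc_no": _default_roi(),
-- 			"date": _default_roi(),
-- 			"account_no": _default_roi(),
-- 			"total": _default_roi(),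
-- 		},
-- 		"proforma": {
-- 			"doc_no": _default_roi(),
-- 			"date": _default_roi(),
-- 			"account_no": _default_roi(),
-- 			"total": _default_roi(),
-- 		},
-- 		"order": {"doc_no": _default_roi()},
-- 		"transfer": {"doc_no": _default_roi()},
-- 		"credit": {"doc_no": _default_roi()},
-- 	}
--
-- def _ensure_schema_defaults(loaded: Any) -> dict[str, Any]:
-- 	"""Merge loaded JSON into defaults, preserving required keys."""
-- 	base = _default_profile()
-- 	if not isinstance(loaded, dict):
-- 		return base
--
-- 	def merge(dst: dict[str, Any], src: Any) -> dict[str, Any]: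
-- 		if not isinstance(src, dict):
-- 			return dst
-- 		for k, v in src.items():
-- 			if k not in dst:
-- 				# Ignore unknown keys; schema is strict.
-- 				continue
-- 			if isinstance(dst[k], dict):
-- 				dst[k] = merge(dict(dst[k]), v)
-- 			else:
-- 				dst[k] = v
-- 		return dst
--
-- 	return merge(base, loaded)
-- ===== SOURCE B (Python) =====
-- from typing import Any
--
-- def _default_roi() -> dict[str, Any]:
-- 	return {"x": None, "y": None, "w": None, "h": None, "dpi": 150}
--
-- def _default_profile() -> dict[str, Any]:
-- 	return {
-- 		"primary_file_type": {"file_type_roi": _default_roi()},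
-- 		"tax_invoice": {
-- 			"doc_no": _default_roi(),
-- 			"date": _default_roi(),
-- 			"account_no": _default_roi(),
-- 			"total": _default_roi(),
-- 		},
-- 		"proforma": {
-- 			"doc_no": _default_roi(),
-- 			"date": _default_roi(),
-- 			"account_no": _default_roi(),
-- 			"total": _default_roi(),
-- 		},
-- 		"order": {"doc_no": _default_roi()},
-- 		"transfer": {"doc_no": _default_roi()},
-- 		"credit": {"doc_no": _default_roi()},
-- 	}
--
-- def _ensure_schema_defaults(loaded: Any) -> dict[str, Any]:
-- 	"""Rebuild the profile leaf-by-leaf from the fixed schema, no recursion: each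
-- 	leaf takes loaded's value at the same path if present, else the default."""
-- 	base = _default_profile()
-- 	if not isinstance(loaded, dict):
-- 		return base
-- 	out: dict[str, Any] = {}
-- 	for sec, rois in base.items():
-- 		src_sec = loaded.get(sec)
-- 		if not isinstance(src_sec, dict):
-- 			src_sec = {}
-- 		sec_out: dict[str, Any] = {}
-- 		for roi, fields in rois.items():
-- 			src_roi = src_sec.get(roi)
-- 			if not isinstance(src_roi, dict):
-- 				src_roi = {}
-- 			sec_out[roi] = {f: (src_roi[f] if f in src_roi else d) for f, d in fields.items()}
-- 		out[sec] = sec_out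
-- 	return out
-- ===== Notes on version B (the rewrite author's own statement) =====
-- stated objective: alternative
-- what changed: A recursively merges loaded into a mutable copy of the defaults by folding over loaded's items at each level; B has no recursion and no merge: three nested loops over the fixed default schema rebuild the profile leaf-by-leaf, pulling each path's value out of loaded with .get and a default. Pre_ excludes association lists with duplicate keys (unrepresentable as a Python dict), on which A's port applies every duplicate entry cumulatively while B's port takes the first match.
import Mathlib
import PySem

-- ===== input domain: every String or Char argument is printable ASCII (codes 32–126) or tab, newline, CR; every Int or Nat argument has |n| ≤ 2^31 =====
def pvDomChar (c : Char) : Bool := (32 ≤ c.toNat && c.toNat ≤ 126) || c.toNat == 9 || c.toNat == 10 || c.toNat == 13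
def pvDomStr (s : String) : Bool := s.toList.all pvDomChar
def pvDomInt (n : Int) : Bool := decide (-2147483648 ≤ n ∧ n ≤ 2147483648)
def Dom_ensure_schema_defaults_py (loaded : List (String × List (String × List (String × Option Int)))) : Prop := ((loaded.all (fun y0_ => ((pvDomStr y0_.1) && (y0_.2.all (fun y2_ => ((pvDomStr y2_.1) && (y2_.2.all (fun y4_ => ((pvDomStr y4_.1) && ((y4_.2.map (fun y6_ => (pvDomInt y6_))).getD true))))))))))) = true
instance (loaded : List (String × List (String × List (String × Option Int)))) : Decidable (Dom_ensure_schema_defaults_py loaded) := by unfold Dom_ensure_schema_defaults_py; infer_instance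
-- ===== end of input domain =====

-- B is non-recursive and schema-driven: it rebuilds the profile leaf-by-leaf by looking
-- each schema path up in `loaded`, instead of A's recursive merge folding over `loaded`
-- that updates a default-profile copy in place (objective: alternative; same cost).

-- Python-dict lookup / overwrite-in-place on the association lists of the fixed task type
def dget {α : Type} (d : List (String × α)) (k : String) : Option α :=
  (PySem.Dict.mk d).get? k
def dset {α : Type} (d : List (String × α)) (k : String) (v : α) : List (String × α) :=
  ((PySem.Dict.mk d).insert k v).items

-- ===== PORT A =====
def default_roi_py : List (String × Option Int) :=
  [("x", none), ("y", none), ("w", none), ("h", none), ("dpi", some 150)]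

def default_profile_py : List (String × List (String × List (String × Option Int))) :=
  [("primary_file_type", [("file_type_roi", default_roi_py)]),
   ("tax_invoice", [("doc_no", default_roi_py), ("date", default_roi_py),
                    ("account_no", default_roi_py), ("total", default_roi_py)]),
   ("proforma", [("doc_no", default_roi_py), ("date", default_roi_py),
                 ("account_no", default_roi_py), ("total", default_roi_py)]),
   ("order", [("doc_no", default_roi_py)]),
   ("transfer", [("doc_no", default_roi_py)]),
   ("credit", [("doc_no", default_roi_py)])]

-- the body of A's `for k, v in src.items()` loop: skip unknown keys, else update dst[k]
-- with the combiner of this nesting level (identity at leaves, a recursive merge on dicts)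
def mstep {α β : Type} (f : α → β → α) (d : List (String × α)) (kv : String × β) :
    List (String × α) :=
  match dget d kv.1 with
  | none => d                       -- `if k not in dst: continue`
  | some cur => dset d kv.1 (f cur kv.2)

-- innermost `merge`: dst[k] is never a dict here (ROI leaves), so `dst[k] = v`
def mergeROI (dst src : List (String × Option Int)) : List (String × Option Int) :=
  src.foldl (mstep (fun _ v => v)) dst

-- middle `merge`: dst[k] is always a dict (an ROI), so `dst[k] = merge(dict(dst[k]), v)`
def mergeSec (dst src : List (String × List (String × Option Int))) :
    List (String × List (String × Option Int)) :=
  src.foldl (mstep mergeROI) dst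

-- outer `merge`: dst[k] is always a dict (a section)
def mergeProf (dst src : List (String × List (String × List (String × Option Int)))) :
    List (String × List (String × List (String × Option Int))) :=
  src.foldl (mstep mergeSec) dst

-- `isinstance(loaded, dict)` always holds under the task's type
def ensure_schema_defaults_py (loaded : List (String × List (String × List (String × Option Int)))) : List (String × List (String × List (String × Option Int))) :=
  mergeProf default_profile_py loaded

-- ===== PORT B =====
-- Source B's three nested schema loops: `src_sec = loaded.get(sec)` falling back to `{}`
-- (under the task's type `loaded.get` never yields a non-dict), likewise `src_roi`,
-- and each leaf is `src_roi[f] if f in src_roi else d`, i.e. `get?` with default `d`.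
def ensure_schema_defaults_py_alt (loaded : List (String × List (String × List (String × Option Int)))) : List (String × List (String × List (String × Option Int))) :=
  default_profile_py.map (fun sec =>
    let srcSec := ((PySem.Dict.mk loaded).get? sec.1).getD []
    (sec.1, sec.2.map (fun roi =>
      let srcRoi := ((PySem.Dict.mk srcSec).get? roi.1).getD []
      (roi.1, roi.2.map (fun fd =>
        (fd.1, ((PySem.Dict.mk srcRoi).get? fd.1).getD fd.2))))))

-- ===== PRECONDITION & SPEC =====
-- Pre_ excludes association lists with duplicate keys at some nesting level: such lists do
-- not represent any Python dict (A only ever receives dicts), and A's-port cumulative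
-- per-entry updates versus B's-port first-match lookup are both accidental there.
def Pre_ensure_schema_defaults_py (loaded : List (String × List (String × List (String × Option Int)))) : Prop :=
  (loaded.map Prod.fst).Nodup ∧
  ∀ p ∈ loaded, (p.2.map Prod.fst).Nodup ∧ ∀ q ∈ p.2, (q.2.map Prod.fst).Nodup
instance (loaded : List (String × List (String × List (String × Option Int)))) : Decidable (Pre_ensure_schema_defaults_py loaded) := by unfold Pre_ensure_schema_defaults_py; infer_instance

def pvWitness_ensure_schema_defaults_py : (List (String × List (String × List (String × Option Int)))) :=
  [("order", [("doc_no", [("x", some 3), ("dpi", some 300)])]), ("junk", [])]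

def Spec_ensure_schema_defaults_py (loaded : List (String × List (String × List (String × Option Int)))) (out : List (String × List (String × List (String × Option Int)))) : Prop := out = ensure_schema_defaults_py_alt loaded
instance (loaded : List (String × List (String × List (String × Option Int)))) (out : List (String × List (String × List (String × Option Int)))) : Decidable (Spec_ensure_schema_defaults_py loaded out) := by
  unfold Spec_ensure_schema_defaults_py
  have d1 : DecidableEq (String × Option Int) := inferInstance
  have d2 : DecidableEq (String × List (String × Option Int)) :=
    @instDecidableEqProd _ _ _ (@instDecidableEqList _ d1)
  have d3 : DecidableEq (String × List (String × List (String × Option Int))) :=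
    @instDecidableEqProd _ _ _ (@instDecidableEqList _ d2)
  exact @instDecidableEqList _ d3 out (ensure_schema_defaults_py_alt loaded)

-- ===== CLAIM (what is proved, stated in full; the proofs are below) =====
def Claim_equal_ensure_schema_defaults_py : Prop := ∀ (loaded : List (String × List (String × List (String × Option Int)))), Dom_ensure_schema_defaults_py loaded → Pre_ensure_schema_defaults_py loaded → Spec_ensure_schema_defaults_py loaded (ensure_schema_defaults_py loaded)

-- ===== LEMMAS AND PROOFS =====

-- proof-only bridge: one entry of B's map, with the combiner of the level abstracted
def pstep {α β : Type} (f : α → β → α) (src : List (String × β)) (kd : String × α) :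
    String × α :=
  match dget src kd.1 with
  | none => kd
  | some v => (kd.1, f kd.2 v)

-- dget on a cons cell
theorem dget_cons {α : Type} (k x : String) (v : α) (t : List (String × α)) :
    dget ((k, v) :: t) x = if k = x then some v else dget t x := by
  simp [dget, PySem.Dict.get?_mk_cons]

-- a key absent from the key list looks up to `none`
theorem dget_eq_none_of_not_mem {α : Type} (d : List (String × α)) (k : String)
    (h : k ∉ d.map Prod.fst) : dget d k = none := by
  induction d with
  | nil => rfl
  | cons p t ih =>
    obtain ⟨k', v⟩ := p
    rw [dget_cons]
    simp only [List.map_cons, List.mem_cons, not_or] at h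
    rw [if_neg (fun hk => h.1 hk.symm)]
    exact ih h.2

theorem mem_key_ne_of_dget_none {α : Type} {d : List (String × α)} {k : String}
    (h : dget d k = none) {kd : String × α} (hm : kd ∈ d) : kd.1 ≠ k := by
  intro hk
  induction d with
  | nil => simp at hm
  | cons p t ih =>
    obtain ⟨k', v⟩ := p
    rw [dget_cons] at h
    by_cases hkk : k' = k
    · simp [hkk] at h
    · rw [if_neg hkk] at h
      rcases List.mem_cons.mp hm with rfl | hmt
      · exact hkk (by simpa using hk)
      · exact ih h hmt

-- with nodup keys, a member's value is what lookup returns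
theorem dget_of_mem_nodup {α : Type} {d : List (String × α)} (hd : (d.map Prod.fst).Nodup)
    {kd : String × α} (hm : kd ∈ d) : dget d kd.1 = some kd.2 := by
  have := PySem.Dict.get?_of_mem_items (d := PySem.Dict.mk d) (k := kd.1) (v := kd.2)
  exact this hm (by simpa [PySem.Dict.keys] using hd)

theorem mem_of_dget_some {α : Type} {d : List (String × α)} {k : String} {v : α}
    (h : dget d k = some v) : (k, v) ∈ d := by
  have := PySem.Dict.mem_items_of_get?_eq_some (d := PySem.Dict.mk d) (k := k) (v := v)
  exact this (by simpa [dget] using h)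

-- overwrite of a present key replaces in place
theorem dset_of_contains {α : Type} {d : List (String × α)} {k : String} {a : α}
    (h : dget d k = some a) (w : α) :
    dset d k w = d.map (fun p => if p.1 == k then (k, w) else p) := by
  have hc : (PySem.Dict.mk d).contains k = true := by
    rw [PySem.Dict.contains_eq_isSome_get?]
    simp [dget] at h; simp [h]
  simpa [dset] using PySem.Dict.items_insert_of_contains (d := PySem.Dict.mk d) (v := w) hc

theorem map_fst_dset {α : Type} {d : List (String × α)} {k : String} {a : α}
    (h : dget d k = some a) (w : α) :
    (dset d k w).map Prod.fst = d.map Prod.fst := by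
  rw [dset_of_contains h w, List.map_map]
  apply List.map_congr_left
  intro p _
  by_cases hp : p.1 = k <;> simp [hp]

-- the central fact: A's fold-update of dst by src equals a map over dst pulling from
-- src, for any per-key combiner f, provided both key lists are duplicate-free
theorem merge_eq_pick {α β : Type} (f : α → β → α) (src : List (String × β)) :
    ∀ (dst : List (String × α)), (dst.map Prod.fst).Nodup → (src.map Prod.fst).Nodup →
    src.foldl (mstep f) dst = dst.map (pstep f src) := by
  induction src with
  | nil =>
    intro dst _ _
    have hid : ∀ kd : String × α, pstep f ([] : List (String × β)) kd = kd := by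
      intro kd
      simp [pstep, show dget ([] : List (String × β)) kd.1 = none from rfl]
    symm
    calc dst.map (pstep f ([] : List (String × β)))
        = dst.map id := List.map_congr_left (fun kd _ => hid kd)
      _ = dst := List.map_id _
  | cons kv t ih =>
    intro dst hd hs
    obtain ⟨k, v⟩ := kv
    simp only [List.map_cons, List.nodup_cons] at hs
    rw [List.foldl_cons]
    cases hget : dget dst k with
    | none =>
      rw [show mstep f dst (k, v) = dst by simp [mstep, hget]]
      rw [ih dst hd hs.2]
      apply List.map_congr_left
      intro kd hm
      have hne : ¬ (k = kd.1) := fun h => mem_key_ne_of_dget_none hget hm h.symm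
      simp only [pstep, dget_cons, if_neg hne]
    | some a =>
      rw [show mstep f dst (k, v) = dset dst k (f a v) by simp [mstep, hget]]
      rw [ih (dset dst k (f a v)) (by rw [map_fst_dset hget]; exact hd) hs.2,
          dset_of_contains hget, List.map_map]
      apply List.map_congr_left
      intro kd hm
      simp only [Function.comp_apply]
      by_cases hk : kd.1 = k
      · have hkd : kd = (k, a) := by
          have h1 := dget_of_mem_nodup hd hm
          rw [hk, hget] at h1
          obtain ⟨k1, v1⟩ := kd
          simp only at hk h1
          simp [hk, ← Option.some_inj.mp h1]
        have ht : dget t k = none := dget_eq_none_of_not_mem t k hs.1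
        simp [hkd, pstep, dget_cons, ht]
      · have h1 : (kd.1 == k) = false := beq_eq_false_iff_ne.mpr hk
        have h2 : ¬ (k = kd.1) := fun h => hk h.symm
        simp only [h1, Bool.false_eq_true, if_false, pstep, dget_cons, if_neg h2]

-- pstep at a leaf level is exactly B's getD lookup
theorem pstep_leaf (src : List (String × Option Int)) (fd : String × Option Int) :
    pstep (fun _ v => v) src fd = (fd.1, (dget src fd.1).getD fd.2) := by
  cases h : dget src fd.1 <;> simp [pstep, h]

-- A's innermost merge is B's leaf map
theorem mergeROI_eq (dflt src : List (String × Option Int))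
    (hd : (dflt.map Prod.fst).Nodup) (hs : (src.map Prod.fst).Nodup) :
    mergeROI dflt src = dflt.map (fun fd => (fd.1, (dget src fd.1).getD fd.2)) := by
  rw [mergeROI, merge_eq_pick (fun _ v => v) src dflt hd hs]
  exact List.map_congr_left (fun fd _ => pstep_leaf src fd)

-- B's leaf map over an empty source is the identity
theorem leaf_map_empty (l : List (String × Option Int)) :
    l.map (fun fd => (fd.1, (dget ([] : List (String × Option Int)) fd.1).getD fd.2)) = l := by
  have : ∀ fd ∈ l, ((fd.1, (dget ([] : List (String × Option Int)) fd.1).getD fd.2) : String × Option Int) = fd := by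
    intro fd _
    simp [show dget ([] : List (String × Option Int)) fd.1 = none from rfl]
  calc l.map (fun fd => (fd.1, (dget ([] : List (String × Option Int)) fd.1).getD fd.2))
      = l.map id := List.map_congr_left this
    _ = l := List.map_id _

-- A's middle merge is B's two inner nested maps
theorem mergeSec_eq (dflt src : List (String × List (String × Option Int)))
    (hd : (dflt.map Prod.fst).Nodup) (hd2 : ∀ q ∈ dflt, (q.2.map Prod.fst).Nodup)
    (hs : (src.map Prod.fst).Nodup) (hs2 : ∀ q ∈ src, (q.2.map Prod.fst).Nodup) :
    mergeSec dflt src = dflt.map (fun roi =>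
      (roi.1, roi.2.map (fun fd =>
        (fd.1, (dget ((dget src roi.1).getD []) fd.1).getD fd.2)))) := by
  rw [mergeSec, merge_eq_pick mergeROI src dflt hd hs]
  apply List.map_congr_left
  intro roi hm
  cases hget : dget src roi.1 with
  | none =>
    obtain ⟨k, r⟩ := roi
    simp only [pstep, hget, Option.getD_none]
    exact congrArg (Prod.mk k) (leaf_map_empty r).symm
  | some s =>
    simp only [pstep, hget, Option.getD_some]
    rw [mergeROI_eq roi.2 s (hd2 roi hm) (hs2 (roi.1, s) (mem_of_dget_some hget))]

-- B's two inner nested maps over an empty source section are the identity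
theorem sec_map_empty (l : List (String × List (String × Option Int))) :
    l.map (fun roi => (roi.1, roi.2.map (fun fd =>
      (fd.1, (dget ((dget ([] : List (String × List (String × Option Int))) roi.1).getD []) fd.1).getD fd.2)))) = l := by
  have h : ∀ roi ∈ l, ((roi.1, roi.2.map (fun fd =>
      (fd.1, (dget ((dget ([] : List (String × List (String × Option Int))) roi.1).getD []) fd.1).getD fd.2))) : String × List (String × Option Int)) = roi := by
    intro roi _
    obtain ⟨k, r⟩ := roi
    have h0 : dget ([] : List (String × List (String × Option Int))) k = none := rfl
    simp only [h0, Option.getD_none]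
    exact congrArg (Prod.mk k) (leaf_map_empty r)
  calc l.map (fun roi => (roi.1, roi.2.map (fun fd =>
        (fd.1, (dget ((dget ([] : List (String × List (String × Option Int))) roi.1).getD []) fd.1).getD fd.2))))
      = l.map id := List.map_congr_left h
    _ = l := List.map_id _

-- B's port, re-read with its `Dict.get?` lookups written as `dget` (definitional)
theorem alt_eq (loaded : List (String × List (String × List (String × Option Int)))) :
    ensure_schema_defaults_py_alt loaded = default_profile_py.map (fun sec =>
      (sec.1, sec.2.map (fun roi =>
        (roi.1, roi.2.map (fun fd =>
          (fd.1, (dget ((dget ((dget loaded sec.1).getD []) roi.1).getD []) fd.1).getD fd.2)))))) := rfl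

-- ===== VERDICT (by name: the statement is the Claim_ definition above) =====
theorem ensure_schema_defaults_py_spec : Claim_equal_ensure_schema_defaults_py := by
  intro loaded _ hpre
  obtain ⟨h1, h2⟩ := hpre
  show ensure_schema_defaults_py loaded = ensure_schema_defaults_py_alt loaded
  rw [ensure_schema_defaults_py, alt_eq, mergeProf,
      merge_eq_pick mergeSec loaded default_profile_py (by decide) h1]
  apply List.map_congr_left
  intro sec hm
  have hd2 : ∀ p ∈ default_profile_py,
      (p.2.map Prod.fst).Nodup ∧ ∀ q ∈ p.2, (q.2.map Prod.fst).Nodup := by decide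
  cases hget : dget loaded sec.1 with
  | none =>
    obtain ⟨k, sv⟩ := sec
    simp only [pstep, hget, Option.getD_none]
    exact congrArg (Prod.mk k) (sec_map_empty sv).symm
  | some s =>
    have hmem : (sec.1, s) ∈ loaded := mem_of_dget_some hget
    simp only [pstep, hget, Option.getD_some]
    rw [mergeSec_eq sec.2 s (hd2 sec hm).1 (hd2 sec hm).2
        (h2 (sec.1, s) hmem).1 (h2 (sec.1, s) hmem).2]
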